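-- pv_equiv track=rewrite | github.com/carlomazzaferro/scikit-hts | hts/functions.py | _get_bl
-- ===== SOURCE A (Python) =====
-- from typing import Dict, List, Tuple
--
-- def _get_bl(grouped_levels: List[str], bottom_levels: List[str]) -> List[List[str]]:
--     """
--     Get bottom level columns required to sum to create grouped columns.
--
--     Parameters
--     ----------
--     grouped_levels : List[str]
--         Grouped level, underscore delimited, column names.
--     bottom_levels : List[str]
--         Bottom level, underscore delimited, column names.
--
--     Returns
--     -------
--     List[List[str]]
--         Bottom level column names that make up each individual aggregated node in the hierarchy.
--     """
--     # Split groupings by "_" b/c this makes it possible to search column names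
--     grouped_levels_split = [lev.split("_") for lev in grouped_levels]
--     bottom_levels_split = [lev.split("_") for lev in bottom_levels]
--
--     cols_to_add = []
--     for lev in grouped_levels_split:
--         group_bl_cols = [
--             bl_col for bl_col in bottom_levels_split if set(lev).issubset(bl_col)
--         ]
--         cols_to_add.append(["_".join(lev) for lev in group_bl_cols])
--     return cols_to_add
-- ===== SOURCE B (Python) =====
-- def _get_bl(grouped_levels, bottom_levels):
--     # Inverted index: token -> set of bottom-level row indices containing it;
--     # each group's members are the intersection of its tokens' posting sets.
--     bottom_split = [lev.split("_") for lev in bottom_levels]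
--     index = {}
--     for i, tokens in enumerate(bottom_split):
--         for tok in tokens:
--             index.setdefault(tok, set()).add(i)
--     empty = set()
--     full = set(range(len(bottom_split)))
--     out = []
--     for lev in grouped_levels:
--         cand = full
--         for tok in lev.split("_"):
--             cand = cand & index.get(tok, empty)
--         out.append(["_".join(bottom_split[i]) for i in sorted(cand)])
--     return out
-- ===== Notes on version B (the rewrite author's own statement) =====
-- stated objective: faster
-- what changed: Replaces the per-group scan of all bottom levels with subset tests by an inverted index token->set of bottom indices built once, intersecting posting sets per group and emitting survivors in ascending index order.
import Mathlib
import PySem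

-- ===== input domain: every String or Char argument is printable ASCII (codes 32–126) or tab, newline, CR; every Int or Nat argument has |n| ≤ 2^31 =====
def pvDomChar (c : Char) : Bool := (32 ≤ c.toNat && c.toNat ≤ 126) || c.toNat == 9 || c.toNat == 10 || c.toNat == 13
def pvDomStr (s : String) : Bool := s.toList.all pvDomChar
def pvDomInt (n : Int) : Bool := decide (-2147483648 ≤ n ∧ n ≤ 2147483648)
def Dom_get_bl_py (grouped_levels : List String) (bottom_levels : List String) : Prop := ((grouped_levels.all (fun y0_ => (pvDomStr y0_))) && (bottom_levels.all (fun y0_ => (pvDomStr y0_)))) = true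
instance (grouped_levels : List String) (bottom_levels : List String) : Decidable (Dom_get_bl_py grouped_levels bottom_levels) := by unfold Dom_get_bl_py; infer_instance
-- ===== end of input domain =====

-- B replaces A's per-group scan over all bottom levels by an inverted index
-- token -> set of bottom indices, intersecting posting sets per group (objective: faster).


-- ===== PORT A =====
-- lev.split("_") with the literal nonempty separator: split? is always some, so .getD [] is exact
def pySplitU (lev : String) : List String := (PySem.Str.split? lev "_").getD []

def get_bl_py (grouped_levels : List String) (bottom_levels : List String) : List (List String) :=
  let grouped_levels_split := grouped_levels.map (fun lev => pySplitU lev)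
  let bottom_levels_split := bottom_levels.map (fun lev => pySplitU lev)
  let cols_to_add := grouped_levels_split.foldl (fun acc lev =>
    let group_bl_cols := bottom_levels_split.filter
      (fun bl_col => PySem.Set.issubset (PySem.Set.ofList lev) bl_col)
    acc ++ [group_bl_cols.map (fun lev => PySem.Str.join "_" lev)]) []
  cols_to_add

-- ===== PORT B =====
def get_bl_py_alt (grouped_levels : List String) (bottom_levels : List String) : List (List String) :=
  let bottom_split := bottom_levels.map (fun lev => pySplitU lev)
  let index : PySem.Dict String (PySem.Set Int) :=
    (PySem.List.enumerate bottom_split).foldl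
      (fun d p => p.2.foldl
        (fun d tok => PySem.Dict.modify d tok PySem.Set.empty (fun s => PySem.Set.add s p.1)) d)
      PySem.Dict.empty
  let full : PySem.Set Int := PySem.Set.ofList (PySem.List.pyRange 0 (bottom_split.length : Int) 1)
  grouped_levels.foldl (fun out lev =>
    let cand := (pySplitU lev).foldl
      (fun cand tok => PySem.Set.inter cand (PySem.Dict.getD index tok PySem.Set.empty)) full
    out ++ [(PySem.List.sorted cand (fun x => x) false).map
      (fun i => PySem.Str.join "_" (PySem.List.pyGetD bottom_split i []))]) []

-- ===== PRECONDITION & SPEC =====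
def Spec_get_bl_py (grouped_levels : List String) (bottom_levels : List String) (out : List (List String)) : Prop := out = get_bl_py_alt grouped_levels bottom_levels
instance (grouped_levels : List String) (bottom_levels : List String) (out : List (List String)) : Decidable (Spec_get_bl_py grouped_levels bottom_levels out) := by unfold Spec_get_bl_py; infer_instance

-- ===== CLAIM (what is proved, stated in full; the proofs are below) =====
def Claim_equal_get_bl_py : Prop := ∀ (grouped_levels : List String) (bottom_levels : List String), Dom_get_bl_py grouped_levels bottom_levels → Spec_get_bl_py grouped_levels bottom_levels (get_bl_py grouped_levels bottom_levels)

-- ===== LEMMAS AND PROOFS =====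

-- fold "acc ++ [f x]" is map
theorem pvFoldlAppend {α β : Type} (f : α → List β) (l : List α) (acc : List (List β)) :
    l.foldl (fun acc x => acc ++ [f x]) acc = acc ++ l.map f := by
  induction l generalizing acc with
  | nil => simp
  | cons x t ih => simp [List.foldl, ih]

-- membership in enumerate
theorem pvMemEnumerate {α : Type} (xs : List α) (s : Int) (p : Int × α) :
    p ∈ PySem.List.enumerate xs s ↔ ∃ j : Nat, ∃ h : j < xs.length, p = (s + (j : Int), xs[j]) := by
  induction xs generalizing s with
  | nil => simp [PySem.List.enumerate]
  | cons x t ih =>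
    simp only [PySem.List.enumerate, List.mem_cons, ih]
    constructor
    · rintro (rfl | ⟨j, h, rfl⟩)
      · exact ⟨0, by simp, by simp⟩
      · exact ⟨j + 1, by simpa using h, by push_cast; ring_nf; simp [Nat.add_comm]⟩
    · rintro ⟨j, h, rfl⟩
      cases j with
      | zero => left; simp
      | succ j => right; exact ⟨j, by simpa using h, by push_cast; ring_nf; simp [Nat.add_comm]⟩

-- the inner fold of the index build: postings membership
theorem pvInnerBuild (toks : List String) (d : PySem.Dict String (PySem.Set Int))
    (j : Int) (tok : String) (i : Int) :
    i ∈ (toks.foldl (fun d t => PySem.Dict.modify d t PySem.Set.empty (fun s => PySem.Set.add s j)) d).getD tok PySem.Set.empty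
      ↔ i ∈ d.getD tok PySem.Set.empty ∨ (tok ∈ toks ∧ i = j) := by
  induction toks generalizing d with
  | nil => simp
  | cons t ts ih =>
    rw [List.foldl_cons, ih, PySem.Dict.modify]
    by_cases h : tok = t
    · subst h
      rw [PySem.Dict.getD, PySem.Dict.get?_insert_self]
      simp only [Option.getD_some, PySem.Set.mem_add, PySem.Dict.getD, List.mem_cons]
      tauto
    · rw [PySem.Dict.getD, PySem.Dict.get?_insert, if_neg h]
      simp only [PySem.Dict.getD, List.mem_cons]
      tauto

-- the whole index build: postings membership
theorem pvBuild (l : List (Int × List String)) (d : PySem.Dict String (PySem.Set Int))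
    (tok : String) (i : Int) :
    i ∈ (l.foldl (fun d p => p.2.foldl (fun d t => PySem.Dict.modify d t PySem.Set.empty (fun s => PySem.Set.add s p.1)) d) d).getD tok PySem.Set.empty
      ↔ i ∈ d.getD tok PySem.Set.empty ∨ ∃ p ∈ l, tok ∈ p.2 ∧ i = p.1 := by
  induction l generalizing d with
  | nil => simp
  | cons p ps ih =>
    simp only [List.foldl, ih, pvInnerBuild]
    constructor
    · rintro ((h | h) | ⟨q, hq, h⟩)
      · exact Or.inl h
      · exact Or.inr ⟨p, by simp, h⟩
      · exact Or.inr ⟨q, by simp [hq], h⟩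
    · rintro (h | ⟨q, hq, h⟩)
      · exact Or.inl (Or.inl h)
      · rcases List.mem_cons.mp hq with rfl | hq
        · exact Or.inl (Or.inr h)
        · exact Or.inr ⟨q, hq, h⟩

-- the intersection fold is a single filter
theorem pvInterFold (toks : List String) (post : String → PySem.Set Int) (c : List Int) :
    toks.foldl (fun c tok => PySem.Set.inter c (post tok)) c
      = c.filter (fun i => toks.all (fun tok => (post tok).contains i)) := by
  induction toks generalizing c with
  | nil => simp
  | cons t ts ih =>
    rw [List.foldl_cons, ih, PySem.Set.inter, List.filter_filter]
    apply List.filter_congr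
    intro i _
    simp [Bool.and_comm]

-- pyRange 0 n 1 is range n, cast
theorem pvPyRange (n : Nat) :
    PySem.List.pyRange 0 (n : Int) 1 = (List.range n).map (Nat.cast : Nat → Int) := by
  rw [PySem.List.pyRange]
  norm_num
  rcases Nat.eq_zero_or_pos n with rfl | hn
  all_goals simp_all

-- filter+map over a list as filter+map over its index range
theorem pvFilterIndex {α β : Type} (xs : List α) (q : α → Bool) (f : α → β) (d : α) :
    (xs.filter q).map f
      = ((List.range xs.length).filter (fun j => q (xs.getD j d))).map (fun j => f (xs.getD j d)) := by
  induction xs with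
  | nil => simp
  | cons x t ih =>
    by_cases hq : q x <;>
      simp [List.range_succ_eq_map, hq, ih, List.filter_map,
        List.map_map, Function.comp_def]

-- sorted (ascending ints) = itself
theorem pvSortedAsc (n : Nat) (q : Nat → Bool) :
    PySem.List.sorted (((List.range n).filter q).map (Nat.cast : Nat → Int)) (fun x => x) false
      = ((List.range n).filter q).map (Nat.cast : Nat → Int) := by
  apply PySem.List.sorted_eq_of_perm_of_pairwise_lt _ _ _ (List.Perm.refl _)
  apply List.Pairwise.map
  · intro a b h; exact_mod_cast h
  · exact (List.pairwise_lt_range).filter _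

theorem get_bl_main : ∀ (g b : List String), get_bl_py g b = get_bl_py_alt g b := by
  intro g b
  unfold get_bl_py get_bl_py_alt
  simp only [pvFoldlAppend, List.map_map, List.nil_append]
  apply List.map_congr_left
  intro lev _
  simp only [Function.comp_apply]
  set bs := b.map (fun lev => pySplitU lev) with hbs
  set toks := pySplitU lev with htoks
  set n := bs.length with hn
  -- B side: index postings membership
  have hpost : ∀ (tok : String) (i : Int),
      ((((PySem.List.enumerate bs).foldl
        (fun d p => p.2.foldl (fun d t => PySem.Dict.modify d t PySem.Set.empty (fun s => PySem.Set.add s p.1)) d)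
        PySem.Dict.empty).getD tok PySem.Set.empty).contains i) = true
      ↔ ∃ j : Nat, ∃ h : j < n, i = (j : Int) ∧ tok ∈ bs[j] := by
    intro tok i
    rw [PySem.Set.contains_iff, pvBuild]
    simp only [PySem.Dict.empty, PySem.Dict.getD, PySem.Dict.get?, List.find?_nil,
      Option.map_none, Option.getD_none, PySem.Set.empty]
    constructor
    · rintro (h | ⟨p, hp, htok, rfl⟩)
      · simp at h
      · rcases (pvMemEnumerate bs 0 p).mp hp with ⟨j, hj, rfl⟩
        exact ⟨j, hj, by simp, htok⟩
    · rintro ⟨j, hj, rfl, htok⟩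
      exact Or.inr ⟨((j : Int), bs[j]), (pvMemEnumerate bs 0 _).mpr ⟨j, hj, by simp⟩, htok, rfl⟩
  -- full set
  have hfull : PySem.Set.ofList (PySem.List.pyRange 0 (n : Int) 1) = (List.range n).map (Nat.cast : Nat → Int) := by
    rw [pvPyRange, PySem.Set.ofList_eq_self_of_nodup]
    exact (List.nodup_range).map (fun a b => by exact_mod_cast id)
  conv_rhs => rw [pvInterFold, hfull, List.filter_map, pvSortedAsc]
  -- A side as an index filter
  rw [pvFilterIndex bs _ _ [], List.map_map]
  rw [show ((fun i => PySem.Str.join "_" (PySem.List.pyGetD bs i [])) ∘ (Nat.cast : Nat → Int))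
      = (fun j : Nat => PySem.Str.join "_" (bs.getD j [])) from
    funext (fun j => by rw [Function.comp_apply, PySem.List.pyGetD_natCast])]
  rw [← hn]
  apply congrArg
  apply List.filter_congr
  intro j hj
  have hjn : j < n := List.mem_range.mp hj
  have hget : bs.getD j [] = bs[j] := List.getD_eq_getElem bs [] hjn
  simp only [Function.comp_def, hget]
  rw [Bool.eq_iff_iff, List.all_eq_true, PySem.Set.issubset_iff]
  constructor
  · intro h tok htok
    exact (hpost tok (j : Int)).mpr ⟨j, hjn, rfl, h tok ((PySem.Set.mem_ofList toks tok).mpr htok)⟩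
  · intro h tok htok
    rcases (hpost tok (j : Int)).mp (h tok ((PySem.Set.mem_ofList toks tok).mp htok)) with ⟨k, hk, hkj, hmem⟩
    have : k = j := by exact_mod_cast hkj.symm
    subst this; exact hmem

-- ===== VERDICT (by name: the statement is the Claim_ definition above) =====
theorem get_bl_py_spec : Claim_equal_get_bl_py := by
  intro g b _
  unfold Spec_get_bl_py
  exact get_bl_main g b
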